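-- pv_equiv track=rewrite | github.com/WilliamBjerglund/AdventOfCodeSolutions | 2025/day6/solution.py | Grand_Total_Math_Homework
-- ===== SOURCE A (Python) =====
-- def Grand_Total_Math_Homework(grid: list[str]) -> int:
--     """ i.e. forgot about eval could have used for a more concise solution """
--     parsed_rows = [line.split() for line in grid if line.strip()]
--     *value_rows, operator_row = parsed_rows  # separate last row as operators
--
--     def multiply_all(numbers): # helper function to calculate product of numbers
--         product = 1
--         for number in numbers:
--             product *= number
--         return product
--
--     grand_total = 0
--     for column_values, operator in zip(zip(*value_rows), operator_row): # iterate over columns and corresponding operators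
--         integer_values = map(int, column_values)
--         grand_total += sum(integer_values) if operator == "+" else multiply_all(integer_values)
--     return grand_total
-- ===== SOURCE B (Python) =====
-- def Grand_Total_Math_Homework(grid: list[str]) -> int:
--     rows = [line.split() for line in grid if line.strip()]
--     *vals, ops = rows  # last non-blank row holds the operators
--     if not vals:
--         return 0
--     n = min(min(len(r) for r in vals), len(ops))
--     acc = [0 if op == "+" else 1 for op in ops[:n]]
--     for row in vals:
--         acc = [a + int(x) if op == "+" else a * int(x)
--                for a, x, op in zip(acc, row, ops)]
--     return sum(acc)
-- ===== Notes on version B (the rewrite author's own statement) =====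
-- stated objective: alternative
-- what changed: B replaces A's transpose-then-aggregate (zip(*rows) building each column, then sum/product per column) by a single row-major pass that folds every row into a per-column accumulator list initialized from the operators, summing the accumulators at the end.
import Mathlib
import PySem

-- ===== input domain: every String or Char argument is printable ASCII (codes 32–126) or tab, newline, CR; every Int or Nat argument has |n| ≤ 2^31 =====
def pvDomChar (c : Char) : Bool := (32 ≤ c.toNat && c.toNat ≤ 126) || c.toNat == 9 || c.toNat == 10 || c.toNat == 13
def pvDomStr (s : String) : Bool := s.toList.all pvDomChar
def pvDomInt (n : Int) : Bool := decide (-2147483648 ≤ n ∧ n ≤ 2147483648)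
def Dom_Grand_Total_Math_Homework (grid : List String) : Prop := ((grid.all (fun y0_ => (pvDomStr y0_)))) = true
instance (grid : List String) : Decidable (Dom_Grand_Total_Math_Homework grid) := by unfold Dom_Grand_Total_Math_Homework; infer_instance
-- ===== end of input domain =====

-- B replaces A's transpose-then-aggregate-per-column by a single row-major fold over a
-- per-column accumulator list (alternative decomposition, same cost).


-- shared input parsing: [line.split() for line in grid if line.strip()]
def pvRows (grid : List String) : List (List String) :=
  (grid.filter (fun l => PySem.Str.strip l != "")).map PySem.Str.split₀

-- int(s); the getD 0 guard is never reached under Pre_ (int() raising is excluded there)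
def pvInt (s : String) : Int := (PySem.Int.ofStr? s).getD 0

-- min of the lengths of v :: vs (zip(*value_rows) truncation width)
def pvMinLen (v : List String) (vs : List (List String)) : Nat :=
  vs.foldl (fun m r => min m r.length) v.length

-- ===== PORT A =====
def pvMultiplyAll (l : List Int) : Int := l.foldl (· * ·) 1

def Grand_Total_Math_Homework (grid : List String) : Int :=
  let parsed := pvRows grid
  match parsed.getLast? with
  | none => 0  -- Python raises ValueError (unpacking an empty list) here; excluded by Pre_
  | some operatorRow =>
    let valueRows := parsed.dropLast
    -- zip(*value_rows): columns, truncated to the shortest row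
    let cols : List (List String) :=
      match valueRows with
      | [] => []
      | v :: vs => (List.range (pvMinLen v vs)).map (fun i => (v :: vs).map (fun r => r.getD i ""))
    (cols.zip operatorRow).foldl
      (fun acc p =>
        let ints := p.1.map pvInt
        acc + (if p.2 == "+" then ints.sum else pvMultiplyAll ints)) 0

-- ===== PORT B =====
def Grand_Total_Math_Homework_alt (grid : List String) : Int :=
  let rows := pvRows grid
  match rows.getLast? with
  | none => 0  -- Python raises here; excluded by Pre_
  | some ops =>
    match rows.dropLast with
    | [] => 0
    | v :: vs =>
      let n := min (pvMinLen v vs) ops.length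
      -- acc = [0 if op == "+" else 1 for op in ops[:n]]   (n ≤ len(ops), so ops[:n] = take n)
      let acc0 := (ops.take n).map (fun op => if op == "+" then (0 : Int) else 1)
      -- for row in vals: acc = [... for a, x, op in zip(acc, row, ops)]
      let acc := (v :: vs).foldl
        (fun acc row =>
          (acc.zip (row.zip ops)).map
            (fun p => if p.2.2 == "+" then p.1 + pvInt p.2.1 else p.1 * pvInt p.2.1)) acc0
      acc.sum

-- ===== PRECONDITION & SPEC =====
-- width of the aggregated region: min over value-row lengths and the operator-row length
def pvN (grid : List String) : Nat :=
  match (pvRows grid).dropLast, ((pvRows grid).getLast?).getD [] with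
  | [], _ => 0
  | v :: vs, ops => min (pvMinLen v vs) ops.length

-- Pre_ = exactly where Python A returns: some non-blank line exists (else the starred
-- unpacking raises ValueError) and every cell in an aggregated column parses as an int
-- (else int() raises ValueError).
def Pre_Grand_Total_Math_Homework (grid : List String) : Prop :=
  pvRows grid ≠ [] ∧
  ∀ r ∈ (pvRows grid).dropLast, ∀ c < pvN grid, PySem.Int.ofStr? (r.getD c "") ≠ none
instance (grid : List String) : Decidable (Pre_Grand_Total_Math_Homework grid) := by
  unfold Pre_Grand_Total_Math_Homework; infer_instance

def pvWitness_Grand_Total_Math_Homework : List String := ["1 2", "3 4", "+ *"]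

def Spec_Grand_Total_Math_Homework (grid : List String) (out : Int) : Prop := out = Grand_Total_Math_Homework_alt grid
instance (grid : List String) (out : Int) : Decidable (Spec_Grand_Total_Math_Homework grid out) := by unfold Spec_Grand_Total_Math_Homework; infer_instance

-- ===== CLAIM (what is proved, stated in full; the proofs are below) =====
def Claim_equal_Grand_Total_Math_Homework : Prop := ∀ (grid : List String), Dom_Grand_Total_Math_Homework grid → Pre_Grand_Total_Math_Homework grid → Spec_Grand_Total_Math_Homework grid (Grand_Total_Math_Homework grid)

-- ===== LEMMAS AND PROOFS =====

-- zipping a range-map with any list is a range-map over the truncated range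
theorem pv_zip_map_range {α β : Type} [Inhabited β] (n : Nat) (f : Nat → α) (l : List β) :
    ((List.range n).map f).zip l
      = (List.range (min n l.length)).map (fun i => (f i, l.getD i default)) := by
  apply List.ext_getElem
  · simp
  · intro i h1 h2
    simp only [List.length_map, List.length_range] at h2 ⊢
    have hl : i < l.length := lt_of_lt_of_le h2 (min_le_right _ _)
    simp [List.getElem_zip, hl]

-- one fold step of B, when the accumulator is a range-map and indices stay in range
theorem pv_step_eq (n : Nat) (f : Nat → Int) (row ops : List String)
    (hr : n ≤ row.length) (ho : n ≤ ops.length) :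
    (((List.range n).map f).zip (row.zip ops)).map
        (fun p => if p.2.2 == "+" then p.1 + pvInt p.2.1 else p.1 * pvInt p.2.1)
      = (List.range n).map
          (fun i => if ops.getD i "" == "+" then f i + pvInt (row.getD i "")
                    else f i * pvInt (row.getD i "")) := by
  apply List.ext_getElem
  · simp; omega
  · intro i h1 h2
    simp only [List.length_map, List.length_range] at h2
    have h2' : i < n := by simp at h1; omega
    have hri : i < row.length := lt_of_lt_of_le h2' hr
    have hoi : i < ops.length := lt_of_lt_of_le h2' ho
    simp [List.getElem_zip, hri, hoi]

-- B's whole fold, with a range-map accumulator, computed columnwise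
theorem pv_fold_eq (rows : List (List String)) (ops : List String) (n : Nat)
    (hr : ∀ r ∈ rows, n ≤ r.length) (ho : n ≤ ops.length) (f : Nat → Int) :
    rows.foldl
        (fun acc row =>
          (acc.zip (row.zip ops)).map
            (fun p => if p.2.2 == "+" then p.1 + pvInt p.2.1 else p.1 * pvInt p.2.1))
        ((List.range n).map f)
      = (List.range n).map
          (fun i => rows.foldl
            (fun a r => if ops.getD i "" == "+" then a + pvInt (r.getD i "")
                        else a * pvInt (r.getD i "")) (f i)) := by
  induction rows generalizing f with
  | nil => rfl
  | cons row rest ih =>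
    have hrow : n ≤ row.length := hr row (by simp)
    have hrest : ∀ r ∈ rest, n ≤ r.length := fun r h => hr r (by simp [h])
    simp only [List.foldl_cons]
    rw [pv_step_eq n f row ops hrow ho,
        ih hrest (fun i => if ops.getD i "" == "+" then f i + pvInt (row.getD i "")
                           else f i * pvInt (row.getD i ""))]

-- the initial accumulator ops[:n] is a range-map
theorem pv_acc0_eq (ops : List String) (n : Nat) (h : n ≤ ops.length) :
    (ops.take n).map (fun op => if op == "+" then (0 : Int) else 1)
      = (List.range n).map (fun i => if ops.getD i "" == "+" then (0 : Int) else 1) := by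
  apply List.ext_getElem
  · simp; omega
  · intro i h1 h2
    simp only [List.length_map, List.length_take] at h1
    have hi : i < n := by omega
    have hoi : i < ops.length := lt_of_lt_of_le hi h
    simp [hoi]

-- every row of v :: vs is at least pvMinLen long
theorem pv_minLen_le (v : List String) (vs : List (List String)) :
    ∀ r ∈ v :: vs, pvMinLen v vs ≤ r.length := by
  have key : ∀ (l : List (List String)) (m : Nat),
      (l.foldl (fun m r => min m r.length) m ≤ m) ∧
      (∀ r ∈ l, l.foldl (fun m r => min m r.length) m ≤ r.length) := by
    intro l
    induction l with
    | nil => intro m; exact ⟨le_refl m, by simp⟩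
    | cons x xs ih =>
      intro m
      constructor
      · exact le_trans ((ih (min m x.length)).1) (min_le_left _ _)
      · intro r hr
        rcases List.mem_cons.mp hr with h | h
        · subst h
          exact le_trans ((ih (min m r.length)).1) (min_le_right _ _)
        · exact (ih (min m x.length)).2 r h
  intro r hr
  rcases List.mem_cons.mp hr with h | h
  · subst h; exact (key vs r.length).1
  · exact (key vs v.length).2 r h

-- ===== VERDICT (by name: the statement is the Claim_ definition above) =====
theorem Grand_Total_Math_Homework_spec : Claim_equal_Grand_Total_Math_Homework := by
  intro grid _ _
  unfold Spec_Grand_Total_Math_Homework Grand_Total_Math_Homework Grand_Total_Math_Homework_alt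
  cases hlast : (pvRows grid).getLast? with
  | none => simp [hlast]
  | some ops =>
    cases hvals : (pvRows grid).dropLast with
    | nil => simp [hlast, hvals]
    | cons v vs =>
      simp only [hlast, hvals]
      have hrows : ∀ r ∈ v :: vs, min (pvMinLen v vs) ops.length ≤ r.length := by
        intro r hr
        exact le_trans (min_le_left _ _) (pv_minLen_le v vs r hr)
      have hops : min (pvMinLen v vs) ops.length ≤ ops.length := min_le_right _ _
      rw [pv_zip_map_range, pv_acc0_eq ops _ hops,
          pv_fold_eq (v :: vs) ops _ hrows hops, PySem.List.foldl_add, List.map_map, zero_add]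
      congr 1
      apply List.map_congr_left
      intro i hi
      have hi' : i < min (pvMinLen v vs) ops.length := List.mem_range.mp hi
      by_cases hop : ops[i]?.getD "" = "+"
      · simp only [Function.comp]
        rw [List.map_map, List.sum_eq_foldl, List.foldl_map]
        simp [pvInt, hop]
      · simp only [Function.comp]
        rw [List.map_map]
        unfold pvMultiplyAll
        rw [List.foldl_map]
        simp [pvInt, hop]
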